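-- pv_equiv track=rewrite | github.com/Varvara-Hromushina/Combinatorics | 4.py | GenerateSubset
-- ===== SOURCE A (Python) =====
-- def GenerateSubset(alphabet, n):
--     if n == 0:
--         return [[]]
--
--     subset = []
--     for i in range(len(alphabet)):
--         current_element = alphabet[i]
--         remaining_alphabet = alphabet[i + 1:]
--         for permutation in GenerateSubset(remaining_alphabet, n - 1):
--             subset.append([current_element] + permutation)
--
--     return subset
-- ===== SOURCE B (Python) =====
-- def GenerateSubset(alphabet, n):
--     # Bottom-up DP over suffixes: rows[k] holds all size-k combinations of the
--     # suffix processed so far; one pass over the alphabet, no recursion.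
--     if n < 0 or n > len(alphabet):
--         return []
--     rows = [[[]]] + [[] for _ in range(n)]
--     for x in reversed(alphabet):
--         rows = [rows[0]] + [[[x] + c for c in rows[k - 1]] + rows[k]
--                             for k in range(1, n + 1)]
--     return rows[n]
-- ===== Notes on version B (the rewrite author's own statement) =====
-- stated objective: alternative
-- what changed: Replaces A's naive recursion over shrinking slices (re-solving every suffix subproblem on demand) by a single bottom-up dynamic-programming pass over the alphabet that maintains a table rows[k] of all size-k combinations, with explicit guards for n < 0 and n > len(alphabet).
import Mathlib
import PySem

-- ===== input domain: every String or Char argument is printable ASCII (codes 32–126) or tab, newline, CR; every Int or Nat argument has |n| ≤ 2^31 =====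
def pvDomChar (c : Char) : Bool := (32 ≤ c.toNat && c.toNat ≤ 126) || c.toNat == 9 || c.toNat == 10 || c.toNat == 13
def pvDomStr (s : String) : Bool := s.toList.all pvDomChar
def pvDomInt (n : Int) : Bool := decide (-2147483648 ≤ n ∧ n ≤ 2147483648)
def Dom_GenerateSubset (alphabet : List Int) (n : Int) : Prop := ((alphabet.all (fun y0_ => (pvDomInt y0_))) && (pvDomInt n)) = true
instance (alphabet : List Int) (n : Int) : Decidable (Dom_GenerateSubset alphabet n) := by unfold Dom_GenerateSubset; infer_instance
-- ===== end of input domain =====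

-- B replaces A's naive recursion over shrinking slices by a single bottom-up DP
-- pass over the alphabet maintaining a table rows[k] of size-k combinations
-- (objective: alternative algorithm; return values proved identical).

-- ===== PORT A =====
-- Literal port of A: recursion with a for-loop over range(len(alphabet));
-- alphabet[i+1:] on a nonnegative in-range index is exactly List.drop (i+1),
-- and alphabet[i] for i < length is exactly the proven-in-range access.
def GenerateSubset (alphabet : List Int) (n : Int) : List (List Int) :=
  if n = 0 then [[]]
  else
    (List.range alphabet.length).attach.foldl
      (fun subset i =>
        let current_element := alphabet[i.1]'(List.mem_range.mp i.2)
        let remaining_alphabet := alphabet.drop (i.1 + 1)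
        subset ++ (GenerateSubset remaining_alphabet (n - 1)).map
          (fun permutation => current_element :: permutation))
      []
termination_by alphabet.length
decreasing_by
  have := List.mem_range.mp i.2
  simp [List.length_drop]; omega

-- ===== PORT B =====
-- one loop iteration of B: rows = [rows[0]] + [map (x::) rows[k-1] ++ rows[k] for k in 1..n]
def GSstep (n : Nat) (rows : List (List (List Int))) (x : Int) : List (List (List Int)) :=
  [rows.getD 0 []] ++ (List.range' 1 n).map
    (fun k => ((rows.getD (k - 1) []).map (fun c => x :: c)) ++ rows.getD k [])

def GenerateSubset_alt (alphabet : List Int) (n : Int) : List (List Int) :=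
  if n < 0 ∨ n > alphabet.length then []
  else
    let N := n.toNat
    let rows0 := [[([] : List Int)]] ++ (List.range N).map (fun _ => [])
    let rows := alphabet.reverse.foldl (GSstep N) rows0
    rows.getD N []

-- ===== PRECONDITION & SPEC =====
def Spec_GenerateSubset (alphabet : List Int) (n : Int) (out : List (List Int)) : Prop := out = GenerateSubset_alt alphabet n
instance (alphabet : List Int) (n : Int) (out : List (List Int)) : Decidable (Spec_GenerateSubset alphabet n out) := by unfold Spec_GenerateSubset; infer_instance

-- ===== CLAIM (what is proved, stated in full; the proofs are below) =====
def Claim_equal_GenerateSubset : Prop := ∀ (alphabet : List Int) (n : Int), Dom_GenerateSubset alphabet n → Spec_GenerateSubset alphabet n (GenerateSubset alphabet n)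

-- ===== LEMMAS AND PROOFS =====

-- mathematical reference: combinations by the standard recurrence
def combs : List Int → Nat → List (List Int)
  | _, 0 => [[]]
  | [], _ + 1 => []
  | x :: rest, k + 1 => (combs rest k).map (x :: ·) ++ combs rest (k + 1)

theorem combs_zero (s : List Int) : combs s 0 = [[]] := by cases s <;> rfl

theorem foldl_app {α β : Type} (l : List α) (g : α → List β) (acc : List β) :
    l.foldl (fun a x => a ++ g x) acc = acc ++ l.flatMap g := by
  induction l generalizing acc with
  | nil => simp
  | cons x t ih => simp [ih]

theorem flatMap_attach {α β : Type} (l : List α) (f : α → List β) :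
    l.attach.flatMap (fun x => f x.1) = l.flatMap f := by
  conv_rhs => rw [← List.attach_map_subtype_val l]
  rw [List.flatMap_map]

theorem flatMap_combs (a : List Int) (m : Nat) :
    (List.range a.length).flatMap
      (fun i => (combs (a.drop (i + 1)) m).map (fun c => a.getD i 0 :: c))
      = combs a (m + 1) := by
  induction a generalizing m with
  | nil => rfl
  | cons x rest ih =>
      rw [List.length_cons, List.range_succ_eq_map, List.flatMap_cons, List.flatMap_map]
      have htail : (List.range rest.length).flatMap
          (fun a => (combs ((x :: rest).drop (a.succ + 1)) m).map
              (fun c => (x :: rest).getD a.succ 0 :: c))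
          = combs rest (m + 1) := by
        rw [← ih m]
        apply List.flatMap_congr
        intro i _
        rfl
      rw [htail]
      rfl

theorem A_eq_combs_aux (L : Nat) : ∀ (alphabet : List Int), alphabet.length ≤ L → ∀ (n : Int),
    GenerateSubset alphabet n = if n < 0 then [] else combs alphabet n.toNat := by
  induction L with
  | zero =>
      intro alphabet hL n
      have : alphabet = [] := List.length_eq_zero_iff.mp (by omega)
      subst this
      rw [GenerateSubset]
      by_cases h0 : n = 0
      · subst h0; simp [combs]
      · simp only [if_neg h0, List.length_nil, List.range_zero, List.attach_nil, List.foldl_nil]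
        split_ifs with hneg
        · rfl
        · have : n.toNat = n.toNat - 1 + 1 := by omega
          rw [this]
          rfl
  | succ L ih =>
      intro alphabet hL n
      rw [GenerateSubset]
      by_cases h0 : n = 0
      · subst h0; simp [combs_zero]
      · simp only [if_neg h0]
        rw [foldl_app, List.nil_append]
        have hbody : (List.range alphabet.length).attach.flatMap
            (fun i =>
              (GenerateSubset (alphabet.drop (i.1 + 1)) (n - 1)).map
                (fun permutation => alphabet[i.1]'(List.mem_range.mp i.2) :: permutation))
            = (List.range alphabet.length).flatMap
            (fun i =>
              ((if n - 1 < 0 then [] else combs (alphabet.drop (i + 1)) (n - 1).toNat).map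
                (fun permutation => alphabet.getD i 0 :: permutation))) := by
          rw [← flatMap_attach (List.range alphabet.length)
            (fun i => ((if n - 1 < 0 then [] else combs (alphabet.drop (i + 1)) (n - 1).toNat).map
                (fun permutation => alphabet.getD i 0 :: permutation)))]
          apply List.flatMap_congr
          intro i _
          have hi : i.1 < alphabet.length := List.mem_range.mp i.2
          rw [ih (alphabet.drop (i.1 + 1)) (by simp [List.length_drop]; omega) (n - 1),
            List.getD_eq_getElem alphabet 0 hi]
        rw [hbody]
        by_cases hneg : n < 0
        · rw [if_pos hneg]
          simp [show n - 1 < 0 by omega]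
        · rw [if_neg hneg]
          simp only [if_neg (show ¬ n - 1 < 0 by omega)]
          have h2 : n.toNat = (n - 1).toNat + 1 := by omega
          rw [h2, ← flatMap_combs alphabet (n - 1).toNat]

theorem A_eq_combs (alphabet : List Int) (n : Int) :
    GenerateSubset alphabet n = if n < 0 then [] else combs alphabet n.toNat :=
  A_eq_combs_aux alphabet.length alphabet le_rfl n

-- the table of rows
def rowsSpec (s : List Int) (N : Nat) : List (List (List Int)) :=
  (List.range (N + 1)).map (fun k => combs s k)

theorem rowsSpec_getD (s : List Int) (N k : Nat) (hk : k ≤ N) :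
    (rowsSpec s N).getD k [] = combs s k := by
  unfold rowsSpec
  rw [List.getD_eq_getElem?_getD, List.getElem?_map, List.getElem?_range (by omega)]
  rfl

theorem rowsSpec_nil (N : Nat) :
    rowsSpec [] N = [[([] : List Int)]] ++ (List.range N).map (fun _ => []) := by
  unfold rowsSpec
  rw [List.range_succ_eq_map, List.map_cons, List.map_map]
  congr 1

theorem GSstep_rowsSpec (s : List Int) (N : Nat) (x : Int) :
    GSstep N (rowsSpec s N) x = rowsSpec (x :: s) N := by
  unfold GSstep
  have h0 : (rowsSpec s N).getD 0 [] = combs s 0 := rowsSpec_getD s N 0 (by omega)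
  rw [h0]
  have hmap : (List.range' 1 N).map
      (fun k => ((rowsSpec s N).getD (k - 1) []).map (fun c => x :: c) ++ (rowsSpec s N).getD k [])
      = (List.range' 1 N).map (fun k => combs (x :: s) k) := by
    apply List.map_congr_left
    intro k hk
    have hk1 : 1 ≤ k ∧ k < 1 + N := List.mem_range'_1.mp hk
    rw [rowsSpec_getD s N (k-1) (by omega), rowsSpec_getD s N k (by omega)]
    obtain ⟨j, rfl⟩ : ∃ j, k = j + 1 := ⟨k - 1, by omega⟩
    simp [combs]
  rw [hmap]
  unfold rowsSpec
  rw [List.range_eq_range', List.range'_succ, List.map_cons]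
  have : combs s 0 = combs (x :: s) 0 := by cases s <;> rfl
  rw [this]
  rfl

theorem foldl_rowsSpec (s : List Int) (N : Nat) :
    s.reverse.foldl (GSstep N) (rowsSpec [] N) = rowsSpec s N := by
  induction s with
  | nil => rfl
  | cons x rest ih =>
      rw [List.reverse_cons, List.foldl_append, ih]
      simp [GSstep_rowsSpec]

theorem combs_nil_of_big (s : List Int) (k : Nat) (h : s.length < k) :
    combs s k = [] := by
  induction s generalizing k with
  | nil => cases k with | zero => omega | succ k => rfl
  | cons x rest ih =>
      cases k with
      | zero => omega
      | succ k =>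
          simp at h
          rw [combs, ih k (by omega), ih (k+1) (by omega)]
          rfl

-- ===== VERDICT (by name: the statement is the Claim_ definition above) =====
theorem GenerateSubset_spec : Claim_equal_GenerateSubset := by
  intro alphabet n _
  unfold Spec_GenerateSubset GenerateSubset_alt
  rw [A_eq_combs]
  show (if n < 0 then [] else combs alphabet n.toNat) =
    if n < 0 ∨ n > (alphabet.length : Int) then []
    else (alphabet.reverse.foldl (GSstep n.toNat)
      ([[([] : List Int)]] ++ (List.range n.toNat).map (fun _ => []))).getD n.toNat []
  by_cases h1 : n < 0
  · rw [if_pos h1, if_pos (Or.inl h1)]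
  · by_cases h2 : n > (alphabet.length : Int)
    · rw [if_neg h1, if_pos (Or.inr h2), combs_nil_of_big alphabet n.toNat (by omega)]
    · rw [if_neg h1, if_neg (not_or.mpr ⟨h1, h2⟩), ← rowsSpec_nil, foldl_rowsSpec,
        rowsSpec_getD alphabet n.toNat n.toNat le_rfl]
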